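-- pv_equiv track=rewrite | github.com/DivyaMaryPhilip/python-daily-practice | day01/day_four_problem.py | returnind
-- ===== SOURCE A (Python) =====
-- def returnind(nums,k):
--     freq={}
--     for everynum in nums:
--         freq[everynum]=freq.get(everynum,0)+1
--
--     for index,num in enumerate(nums):
--         if freq[num]==k:
--             return index
--     return -1
-- ===== SOURCE B (Python) =====
-- def returnind(nums, k):
--     # One pass: for each value record (occurrences so far, index of first occurrence);
--     # then take the minimum first-occurrence index among values whose total count is k.
--     stats = {}
--     for i, x in enumerate(nums):
--         if x in stats:
--             c, f = stats[x]
--             stats[x] = (c + 1, f)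
--         else:
--             stats[x] = (1, i)
--     best = -1
--     for c, f in stats.values():
--         if c == k and (best == -1 or f < best):
--             best = f
--     return best
-- ===== Notes on version B (the rewrite author's own statement) =====
-- stated objective: alternative
-- what changed: Instead of A's count table plus a second scan of nums, B makes a single pass recording (count, first-occurrence index) per value and returns the minimum first-occurrence index among values whose count is k; the output scan is over distinct values, not over nums.
import Mathlib
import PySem

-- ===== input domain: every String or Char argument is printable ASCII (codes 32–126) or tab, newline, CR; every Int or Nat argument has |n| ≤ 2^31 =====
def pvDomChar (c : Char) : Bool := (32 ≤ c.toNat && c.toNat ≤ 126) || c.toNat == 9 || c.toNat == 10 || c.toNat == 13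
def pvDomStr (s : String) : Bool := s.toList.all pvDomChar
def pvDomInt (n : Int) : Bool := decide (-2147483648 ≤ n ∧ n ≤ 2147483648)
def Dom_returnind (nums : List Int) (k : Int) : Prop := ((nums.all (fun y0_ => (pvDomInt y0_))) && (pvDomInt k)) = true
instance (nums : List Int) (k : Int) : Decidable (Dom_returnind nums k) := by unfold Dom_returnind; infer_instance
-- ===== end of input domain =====

-- B replaces A's count-table + second scan of nums by a single pass recording (count, first index)
-- per value and a minimum over those first indices (objective: alternative).

-- ===== PORT A =====
-- second loop of A: scan enumerate(nums), return first index whose frequency equals k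
-- (freq[num] cannot raise: num ∈ nums, so the key is present; getD 0 is exact here)
def returnindScan (freq : PySem.Dict Int Int) (k : Int) : List (Int × Int) → Int
  | [] => -1
  | (index, num) :: rest =>
      if freq.getD num 0 == k then index else returnindScan freq k rest

def returnind (nums : List Int) (k : Int) : Int :=
  let freq : PySem.Dict Int Int :=
    nums.foldl (fun d everynum => d.insert everynum (d.getD everynum 0 + 1)) PySem.Dict.empty
  returnindScan freq k (PySem.List.enumerate nums)

-- ===== PORT B =====
-- first loop of B: stats[x] = (count so far, first index) per value
def statsStep (d : PySem.Dict Int (Int × Int)) (p : Int × Int) : PySem.Dict Int (Int × Int) :=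
  d.insert p.2 (match d.get? p.2 with
                | some cf => (cf.1 + 1, cf.2)
                | none => (1, p.1))

def statsOf (nums : List Int) : PySem.Dict Int (Int × Int) :=
  (PySem.List.enumerate nums).foldl statsStep PySem.Dict.empty

-- second loop of B: best = minimum first index among entries with count k, -1 if none
def bestOf (k : Int) : List (Int × Int) → Int → Int
  | [], best => best
  | (c, f) :: rest, best =>
      bestOf k rest (if c == k && (best == -1 || f < best) then f else best)

def returnind_alt (nums : List Int) (k : Int) : Int :=
  bestOf k (statsOf nums).values (-1)

-- ===== PRECONDITION & SPEC =====
def Spec_returnind (nums : List Int) (k : Int) (out : Int) : Prop := out = returnind_alt nums k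
instance (nums : List Int) (k : Int) (out : Int) : Decidable (Spec_returnind nums k out) := by unfold Spec_returnind; infer_instance

-- ===== CLAIM (what is proved, stated in full; the proofs are below) =====
def Claim_equal_returnind : Prop := ∀ (nums : List Int) (k : Int), Dom_returnind nums k → Spec_returnind nums k (returnind nums k)

-- ===== LEMMAS AND PROOFS =====

-- first index of the first element of l (as pairs (index, value)) whose value satisfies P, else -1
def firstIdxP (l : List (Int × Int)) (P : Int → Bool) : Int :=
  match l.find? (fun p => P p.2) with
  | some p => p.1
  | none => -1

-- index of the first occurrence of v in nums (0 if absent; only used when v is a member)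
def fIdx (nums : List Int) (v : Int) : Int :=
  (((PySem.List.index? nums v).getD 0 : Nat) : Int)

-- A's scan with the finished counter is the first-index-satisfying-P scan
theorem returnindScan_counter (nums : List Int) (k : Int) (l : List (Int × Int)) :
    returnindScan (PySem.Dict.counter nums) k l
      = firstIdxP l (fun x => ((nums.count x : Int) == k)) := by
  induction l with
  | nil => rfl
  | cons p rest ih =>
      obtain ⟨i, x⟩ := p
      by_cases h : ((nums.count x : Int) == k) = true <;>
        simp [returnindScan, firstIdxP, PySem.Dict.getD_counter, h, ih]

theorem bestOf_frozen (k : Int) (L : List (Int × Int)) (b : Int)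
    (h : ∀ p ∈ L, (p.1 == k && (b == -1 || p.2 < b)) = false) :
    bestOf k L b = b := by
  induction L with
  | nil => rfl
  | cons p rest ih =>
      obtain ⟨c, f⟩ := p
      have hp := h (c, f) (by simp)
      simp only [bestOf, hp]
      rw [if_neg (by simp)]
      exact ih (fun q hq => h q (by simp [hq]))

theorem bestOf_eq_find? (k : Int) (L : List (Int × Int))
    (hmono : L.Pairwise (fun a b => a.2 < b.2)) (hpos : ∀ p ∈ L, 0 ≤ p.2) :
    bestOf k L (-1) =
      match L.find? (fun p => p.1 == k) with
      | some p => p.2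
      | none => -1 := by
  induction L with
  | nil => rfl
  | cons p rest ih =>
      obtain ⟨c, f⟩ := p
      have hf : 0 ≤ f := hpos (c, f) (by simp)
      by_cases hc : (c == k) = true
      · have hrest : ∀ q ∈ rest, (q.1 == k && (f == -1 || q.2 < f)) = false := by
          intro q hq
          have h1 : f < q.2 := (List.pairwise_cons.mp hmono).1 q hq
          have h2 : (f == (-1 : Int)) = false := by
            simp only [beq_eq_false_iff_ne]; omega
          simp [h2]; omega
        simp [bestOf, hc, bestOf_frozen k rest f hrest]
      · simp only [bestOf, hc, Bool.false_and, List.find?_cons]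
        rw [if_neg (by simp)]
        rw [ih (List.pairwise_cons.mp hmono).2 (fun q hq => hpos q (by simp [hq]))]

-- keys of the stats dict: the distinct values of nums, in first-occurrence order
theorem keys_statsOf (nums : List Int) :
    (statsOf nums).keys = PySem.Set.ofList nums := by
  have h := PySem.Dict.keys_foldl_insert_key (ν := Int × Int)
    (PySem.List.enumerate nums) (fun p : Int × Int => p.2)
    (fun d p => match d.get? p.2 with
                | some cf => (cf.1 + 1, cf.2)
                | none => (1, p.1)) PySem.Dict.empty
  unfold statsOf statsStep
  rw [h]
  simp [PySem.List.map_snd_enumerate, PySem.Set.ofList_eq_foldl, PySem.Set.update]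

theorem nodup_keys_statsOf (nums : List Int) : (statsOf nums).keys.Nodup := by
  have h := PySem.Dict.nodup_keys_foldl_insert_key (ν := Int × Int)
    (PySem.List.enumerate nums) (fun p : Int × Int => p.2)
    (fun d p => match d.get? p.2 with
                | some cf => (cf.1 + 1, cf.2)
                | none => (1, p.1)) PySem.Dict.empty PySem.Dict.nodup_keys_empty
  unfold statsOf statsStep
  exact h

-- lookup in the stats fold: counts all occurrences, keeps the first index
theorem get?_foldl_statsStep (l : List (Int × Int)) (d : PySem.Dict Int (Int × Int)) (v : Int) :
    (l.foldl statsStep d).get? v =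
      match d.get? v with
      | some cf => some (cf.1 + ((l.map (·.2)).count v : Int), cf.2)
      | none =>
          (l.find? (fun p => p.2 == v)).map
            (fun p => (((l.map (·.2)).count v : Int), p.1)) := by
  induction l generalizing d with
  | nil => cases h : d.get? v <;> simp [h]
  | cons p rest ih =>
      obtain ⟨i, x⟩ := p
      rw [List.foldl_cons, ih]
      by_cases hv : v = x
      · subst hv
        cases h : d.get? v with
        | some cf =>
            simp [statsStep, h, PySem.Dict.get?_insert_self]
            ring
        | none =>
            simp [statsStep, h, PySem.Dict.get?_insert_self]
            omega
      · have hget : (statsStep d (i, x)).get? v = d.get? v := by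
          unfold statsStep
          exact PySem.Dict.get?_insert_of_ne d _ hv
        rw [hget]
        have hcnt : (((i, x) :: rest).map (·.2)).count v = (rest.map (·.2)).count v := by
          simp [List.count_cons]
          omega
        have hfind : (((i, x) :: rest).find? (fun p => p.2 == v))
            = rest.find? (fun p => p.2 == v) :=
          List.find?_cons_of_neg (by simp; omega)
        rw [hcnt, hfind]

-- find? over enumerate localises to index?
theorem find?_enumerate_eq (xs : List Int) (s : Int) (v : Int) :
    (PySem.List.enumerate xs s).find? (fun p => p.2 == v)
      = (PySem.List.index? xs v).map (fun n => (s + (n : Int), v)) := by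
  induction xs generalizing s with
  | nil => simp [PySem.List.enumerate]
  | cons x xs ih =>
      rw [PySem.List.enumerate_cons]
      by_cases h : x = v
      · subst h
        rw [PySem.List.index?_cons_self]
        simp
      · rw [List.find?_cons_of_neg (by simp; omega), ih, PySem.List.index?_cons_of_ne xs h]
        cases hi : PySem.List.index? xs v with
        | none => simp
        | some n => simp; omega

-- the values list of the stats dict, in first-occurrence order
theorem values_statsOf (nums : List Int) :
    (statsOf nums).values
      = (PySem.List.dedup nums).map
          (fun v => (((nums.count v : Nat) : Int), fIdx nums v)) := by
  rw [PySem.Dict.values_eq_map_keys (statsOf nums) (nodup_keys_statsOf nums) ((0 : Int), (0 : Int)),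
    keys_statsOf]
  have hded : PySem.Set.ofList nums = PySem.List.dedup nums := by
    simp
  rw [hded]
  apply List.map_congr_left
  intro v hv
  have hvmem : v ∈ nums := (PySem.List.mem_dedup nums v).mp hv
  obtain ⟨n, hn⟩ := Option.isSome_iff_exists.mp ((PySem.List.index?_isSome_iff nums v).mpr hvmem)
  have hg := get?_foldl_statsStep (PySem.List.enumerate nums) PySem.Dict.empty v
  rw [PySem.Dict.get?_empty] at hg
  rw [find?_enumerate_eq nums 0 v, hn] at hg
  simp only [PySem.List.map_snd_enumerate] at hg
  unfold statsOf at *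
  rw [PySem.Dict.getD_eq_get?_getD, hg]
  rw [PySem.List.index?_eq_idxOf?] at hn
  simp [fIdx, hn]

-- dedup of a right-extended list
theorem dedup_append_singleton (xs : List Int) (x : Int) :
    PySem.List.dedup (xs ++ [x])
      = if x ∈ xs then PySem.List.dedup xs else PySem.List.dedup xs ++ [x] := by
  simp only [PySem.List.dedup_eq_ofList, PySem.Set.ofList_eq_foldl, List.foldl_append,
    List.foldl_cons, PySem.Set.add, PySem.Set.contains_eq_listContains, List.contains_eq_mem,
    decide_eq_true_eq, List.foldl_nil]
  simp [← PySem.Set.ofList_eq_foldl]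

theorem fIdx_append_of_mem (xs t : List Int) (v : Int) (hv : v ∈ xs) :
    fIdx (xs ++ t) v = fIdx xs v := by
  unfold fIdx
  rw [PySem.List.index?_append_of_mem t hv]

theorem fIdx_append_singleton_self (xs : List Int) (x : Int) (hx : x ∉ xs) :
    fIdx (xs ++ [x]) x = (xs.length : Int) := by
  unfold fIdx
  rw [PySem.List.index?_append_singleton_self xs x hx]
  simp

theorem fIdx_lt_length (xs : List Int) (v : Int) (hv : v ∈ xs) :
    fIdx xs v < (xs.length : Int) := by
  obtain ⟨n, hn⟩ := Option.isSome_iff_exists.mp ((PySem.List.index?_isSome_iff xs v).mpr hv)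
  obtain ⟨hk, -, -⟩ := PySem.List.getElem_of_index?_eq_some hn
  unfold fIdx
  rw [hn]
  simpa using hk

theorem fIdx_nonneg (xs : List Int) (v : Int) : 0 ≤ fIdx xs v := by
  unfold fIdx; positivity

-- first-occurrence indices strictly increase along the dedup order
theorem pairwise_fIdx_dedup (nums : List Int) :
    (PySem.List.dedup nums).Pairwise (fun a b => fIdx nums a < fIdx nums b) := by
  induction nums using List.reverseRecOn with
  | nil => simp [PySem.List.dedup]
  | append_singleton xs x ih =>
      rw [dedup_append_singleton]
      by_cases hx : x ∈ xs
      · rw [if_pos hx]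
        refine ih.imp_of_mem ?_
        intro a b ha hb hab
        have ha' : a ∈ xs := (PySem.List.mem_dedup xs a).mp ha
        have hb' : b ∈ xs := (PySem.List.mem_dedup xs b).mp hb
        rwa [fIdx_append_of_mem _ _ _ ha', fIdx_append_of_mem _ _ _ hb']
      · rw [if_neg hx]
        rw [List.pairwise_append]
        refine ⟨?_, by simp, ?_⟩
        · refine ih.imp_of_mem ?_
          intro a b ha hb hab
          have ha' : a ∈ xs := (PySem.List.mem_dedup xs a).mp ha
          have hb' : b ∈ xs := (PySem.List.mem_dedup xs b).mp hb
          rwa [fIdx_append_of_mem _ _ _ ha', fIdx_append_of_mem _ _ _ hb']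
        · intro a ha b hb
          rw [List.mem_singleton] at hb
          subst hb
          have ha' : a ∈ xs := (PySem.List.mem_dedup xs a).mp ha
          rw [fIdx_append_of_mem _ _ _ ha', fIdx_append_singleton_self xs b hx]
          exact fIdx_lt_length xs a ha'

-- no scan hit on values ↔ no scan hit on distinct values
theorem find?_enumerate_none_iff (xs : List Int) (P : Int → Bool) :
    (PySem.List.enumerate xs 0).find? (fun p => P p.2) = none
      ↔ (PySem.List.dedup xs).find? P = none := by
  rw [List.find?_eq_none, List.find?_eq_none]
  constructor
  · intro h v hv
    have hv' : v ∈ xs := (PySem.List.mem_dedup xs v).mp hv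
    obtain ⟨k, hk, hvk⟩ := List.mem_iff_getElem.mp hv'
    have : ((0 : Int) + (k : Int), xs[k]) ∈ PySem.List.enumerate xs 0 :=
      (PySem.List.mem_enumerate_iff xs 0 _).mpr ⟨k, hk, rfl⟩
    have := h _ this
    simpa [hvk] using this
  · intro h p hp
    obtain ⟨k, hk, rfl⟩ := (PySem.List.mem_enumerate_iff xs 0 p).mp hp
    exact h xs[k] ((PySem.List.mem_dedup xs _).mpr (List.getElem_mem hk))

-- scanning nums is scanning its distinct values and taking the first index
theorem firstIdxP_dedup (nums : List Int) (P : Int → Bool) :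
    firstIdxP (PySem.List.enumerate nums) P
      = match (PySem.List.dedup nums).find? P with
        | some v => fIdx nums v
        | none => -1 := by
  induction nums using List.reverseRecOn with
  | nil => simp [firstIdxP, PySem.List.enumerate, PySem.List.dedup]
  | append_singleton xs x ih =>
      have henum : PySem.List.enumerate (xs ++ [x]) 0
          = PySem.List.enumerate xs 0 ++ [((xs.length : Int), x)] := by
        rw [PySem.List.enumerate_append]
        simp [PySem.List.enumerate]
      show firstIdxP (PySem.List.enumerate (xs ++ [x]) 0) P = _
      rw [henum]
      unfold firstIdxP
      rw [List.find?_append]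
      cases hL : (PySem.List.enumerate xs 0).find? (fun p => P p.2) with
      | some p =>
          -- the left scan already hits: both sides are unchanged by the new element
          have hD : (PySem.List.dedup xs).find? P ≠ none := by
            intro hnone
            rw [← find?_enumerate_none_iff xs P] at hnone
            rw [hL] at hnone; exact Option.some_ne_none p hnone
          obtain ⟨v, hv⟩ := Option.ne_none_iff_exists'.mp hD
          have hvmem : v ∈ xs :=
            (PySem.List.mem_dedup xs v).mp (List.mem_of_find?_eq_some hv)
          have hfd : (PySem.List.dedup (xs ++ [x])).find? P = some v := by
            rw [dedup_append_singleton]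
            by_cases hx : x ∈ xs
            · rw [if_pos hx]; exact hv
            · rw [if_neg hx, List.find?_append, hv]; rfl
          rw [Option.some_or, hfd]
          have := ih
          unfold firstIdxP at this
          rw [hL, hv] at this
          rw [this]
          show fIdx xs v = fIdx (xs ++ [x]) v
          rw [fIdx_append_of_mem xs [x] v hvmem]
      | none =>
          have hD : (PySem.List.dedup xs).find? P = none :=
            (find?_enumerate_none_iff xs P).mp hL
          have hall : ∀ v ∈ xs, ¬ P v = true := by
            intro v hv
            exact List.find?_eq_none.mp hD v ((PySem.List.mem_dedup xs v).mpr hv)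
          rw [Option.none_or]
          by_cases hPx : P x = true
          · -- the new element is the first (and only possible) hit
            have hxnot : x ∉ xs := fun hmem => hall x hmem hPx
            have hfd : (PySem.List.dedup (xs ++ [x])).find? P = some x := by
              rw [dedup_append_singleton, if_neg hxnot, List.find?_append, hD,
                Option.none_or]
              simp [hPx]
            rw [hfd]
            simp only [List.find?_singleton]
            rw [if_pos (by simpa using hPx)]
            rw [fIdx_append_singleton_self xs x hxnot]
          · have hfd : (PySem.List.dedup (xs ++ [x])).find? P = none := by
              rw [dedup_append_singleton]
              by_cases hx : x ∈ xs
              · rw [if_pos hx]; exact hD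
              · rw [if_neg hx, List.find?_append, hD, Option.none_or]
                simp [hPx]
            rw [hfd]
            simp only [List.find?_singleton]
            rw [if_neg (by simpa using hPx)]

-- ===== VERDICT (by name: the statement is the Claim_ definition above) =====
theorem returnind_spec : Claim_equal_returnind := by
  intro nums k _
  unfold Spec_returnind returnind returnind_alt
  rw [PySem.Dict.foldl_insert_getD_add_one_eq_counter, returnindScan_counter,
    firstIdxP_dedup, values_statsOf]
  have hpw : ((PySem.List.dedup nums).map
      (fun v => (((nums.count v : Nat) : Int), fIdx nums v))).Pairwise
        (fun a b => a.2 < b.2) :=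
    (List.pairwise_map).mpr (pairwise_fIdx_dedup nums)
  have hpos : ∀ p ∈ (PySem.List.dedup nums).map
      (fun v => (((nums.count v : Nat) : Int), fIdx nums v)), 0 ≤ p.2 := by
    intro p hp
    obtain ⟨v, hv, rfl⟩ := List.mem_map.mp hp
    exact fIdx_nonneg nums v
  have hcomp : ((PySem.List.dedup nums).map
        (fun v => (((nums.count v : Nat) : Int), fIdx nums v))).find? (fun p => p.1 == k)
      = ((PySem.List.dedup nums).find? (fun v => ((nums.count v : Nat) : Int) == k)).map
          (fun v => (((nums.count v : Nat) : Int), fIdx nums v)) := by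
    rw [List.find?_map]
    rfl
  rw [bestOf_eq_find? k _ hpw hpos, hcomp]
  cases (PySem.List.dedup nums).find? (fun v => ((nums.count v : Nat) : Int) == k) <;> rfl
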